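-- pv_equiv track=rewrite | github.com/stingram/Simple-Problems | Lesson_Maze_Paths/python/maze_paths.py | maze_paths
-- ===== SOURCE A (Python) =====
-- def maze_paths(maze):
--     paths = [[0]*len(row) for row in maze]
--     paths[0][0] = 1
--
--     for i, row in enumerate(maze):
--         for j, col in enumerate(maze[i]):
--
--             if i == 0 and j == 0:
--                 continue
--
--             if maze[i][j] == 0:
--                 # top row
--                 if i == 0:
--                     paths[i][j] = paths[i][j-1]
--
--                 # left column
--                 elif j == 0:
--                     paths[i][j] = paths[i-1][j]
--
--                 else:
--                     paths[i][j] = paths[i][j-1] + paths[i-1][j]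
--
--     return paths[-1][-1]
-- ===== SOURCE B (Python) =====
-- def maze_paths(maze):
--     # Top-down memoized recursion from the exit instead of A's bottom-up
--     # 2-D table: count(i, j) is the number of paths reaching cell (i, j).
--     memo = {}
--
--     def count(i, j):
--         if i == 0 and j == 0:
--             return 1
--         if i < 0 or j < 0:
--             return 0
--         if (i, j) in memo:
--             return memo[(i, j)]
--         if maze[i][j] != 0:
--             r = 0
--         else:
--             r = count(i, j - 1) + count(i - 1, j)
--         memo[(i, j)] = r
--         return r
--
--     return count(len(maze) - 1, len(maze[-1]) - 1)
-- ===== Notes on version B (the rewrite author's own statement) =====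
-- stated objective: alternative
-- what changed: B replaces A's bottom-up preallocated 2-D table filled in row-major order by top-down memoized recursion from the exit cell (count(i,j) = count(i,j-1)+count(i-1,j) with a dict cache), a different decomposition of the same counting problem.
import Mathlib
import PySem

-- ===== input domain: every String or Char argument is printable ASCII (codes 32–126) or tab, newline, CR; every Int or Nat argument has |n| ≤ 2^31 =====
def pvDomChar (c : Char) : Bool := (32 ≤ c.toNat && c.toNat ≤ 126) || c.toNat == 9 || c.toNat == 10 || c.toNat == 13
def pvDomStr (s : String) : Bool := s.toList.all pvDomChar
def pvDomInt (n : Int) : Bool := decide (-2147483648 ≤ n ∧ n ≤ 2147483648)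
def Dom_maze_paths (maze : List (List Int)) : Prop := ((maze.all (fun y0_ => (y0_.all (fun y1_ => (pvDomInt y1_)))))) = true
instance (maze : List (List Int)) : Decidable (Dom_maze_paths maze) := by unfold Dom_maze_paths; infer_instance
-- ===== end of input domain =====

-- B replaces A's bottom-up preallocated 2-D table, filled in row-major order,
-- by top-down memoized recursion from the exit cell (a dict cache).
-- Equivalence is about the return value.

-- ===== PORT A =====
-- paths[i][j] read/write (Python indexing; in-range on every Pre_ input)
def pvGet2 (p : List (List Int)) (i j : Int) : Int :=
  PySem.List.pyGetD (PySem.List.pyGetD p i []) j 0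

def pvSet2 (p : List (List Int)) (i j : Int) (v : Int) : List (List Int) :=
  PySem.List.pySetD p i (PySem.List.pySetD (PySem.List.pyGetD p i []) j v)

-- the body of A's double loop
def pvStepA (maze : List (List Int)) (p : List (List Int)) (i j : Int) : List (List Int) :=
  if i = 0 ∧ j = 0 then p
  else if pvGet2 maze i j = 0 then
    if i = 0 then pvSet2 p i j (pvGet2 p i (j - 1))
    else if j = 0 then pvSet2 p i j (pvGet2 p (i - 1) j)
    else pvSet2 p i j (pvGet2 p i (j - 1) + pvGet2 p (i - 1) j)
  else p

def maze_paths (maze : List (List Int)) : Int :=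
  let paths := pvSet2 (maze.map (fun row => List.replicate row.length (0 : Int))) 0 0 1
  let final := (PySem.List.enumerate maze 0).foldl
    (fun p ir => (PySem.List.enumerate (PySem.List.pyGetD maze ir.1 []) 0).foldl
      (fun q jc => pvStepA maze q ir.1 jc.1) p) paths
  PySem.List.pyGetD (PySem.List.pyGetD final (-1) []) (-1) 0

-- ===== PORT B =====
-- B's inner function count(i, j), threading the memo dict through the calls:
-- returns (updated memo, number of paths reaching cell (i, j))
def pvCount (maze : List (List Int)) (memo : PySem.Dict (Int × Int) Int) (i j : Int) :
    PySem.Dict (Int × Int) Int × Int :=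
  if i = 0 ∧ j = 0 then (memo, 1)
  else if i < 0 ∨ j < 0 then (memo, 0)
  else
    match memo.get? (i, j) with
    | some v => (memo, v)
    | none =>
      if PySem.List.pyGetD (PySem.List.pyGetD maze i []) j 0 ≠ 0 then
        (memo.insert (i, j) 0, 0)
      else
        let res1 := pvCount maze memo i (j - 1)
        let res2 := pvCount maze res1.1 (i - 1) j
        let r := res1.2 + res2.2
        (res2.1.insert (i, j) r, r)
termination_by (i + j).toNat
decreasing_by all_goals omega

def maze_paths_alt (maze : List (List Int)) : Int :=
  (pvCount maze PySem.Dict.empty ((maze.length : Int) - 1)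
    (((PySem.List.pyGetD maze (-1) []).length : Int) - 1)).2

-- ===== PRECONDITION & SPEC =====
-- Pre_ excludes exactly the inputs where Python A raises: empty maze / empty first
-- or last row (IndexError on paths[0][0] or paths[-1][-1]), and ragged mazes where
-- a zero cell of row i has no cell above it in row i-1 (IndexError on paths[i-1][j]).
def Pre_maze_paths (maze : List (List Int)) : Prop :=
  maze ≠ [] ∧ maze.headD [] ≠ [] ∧ maze.getLastD [] ≠ [] ∧
  ∀ i, i < maze.length → ∀ j, j < (maze.getD i []).length →
    0 < i → (maze.getD i []).getD j 0 = 0 → j < (maze.getD (i - 1) []).length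

instance (maze : List (List Int)) : Decidable (Pre_maze_paths maze) := by
  unfold Pre_maze_paths; infer_instance

def pvWitness_maze_paths : List (List Int) := [[0, 0], [0, 0]]

def Spec_maze_paths (maze : List (List Int)) (out : Int) : Prop := out = maze_paths_alt maze
instance (maze : List (List Int)) (out : Int) : Decidable (Spec_maze_paths maze out) := by
  unfold Spec_maze_paths; infer_instance

-- ===== CLAIM (what is proved, stated in full; the proofs are below) =====
def Claim_equal_maze_paths : Prop := ∀ (maze : List (List Int)), Dom_maze_paths maze → Pre_maze_paths maze → Spec_maze_paths maze (maze_paths maze)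

-- ===== LEMMAS AND PROOFS =====

-- the shared mathematical recurrence both ports compute (proof-side only)
def pvSpec (maze : List (List Int)) (i j : Int) : Int :=
  if i = 0 ∧ j = 0 then 1
  else if i < 0 ∨ j < 0 then 0
  else if PySem.List.pyGetD (PySem.List.pyGetD maze i []) j 0 ≠ 0 then 0
  else pvSpec maze i (j - 1) + pvSpec maze (i - 1) j
termination_by (i + j).toNat
decreasing_by all_goals omega

-- small List.getD / List.set helpers
theorem pvGetD_append_lt {α : Type} (l r : List α) (k : Nat) (d : α) (h : k < l.length) :
    (l ++ r).getD k d = l.getD k d := by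
  simp [List.getD_eq_getElem?_getD, List.getElem?_append_left h]

theorem pvGetD_append_len {α : Type} (l : List α) (a : α) (r : List α) (d : α) :
    (l ++ a :: r).getD l.length d = a := by
  simp [List.getD_eq_getElem?_getD]

theorem pvGetD_ge {α : Type} (l : List α) (k : Nat) (d : α) (h : l.length ≤ k) :
    l.getD k d = d := by
  simp [List.getD_eq_getElem?_getD, List.getElem?_eq_none h]

theorem pvSet_append_len {α : Type} (l : List α) (a v : α) (r : List α) :
    (l ++ a :: r).set l.length v = l ++ v :: r := by
  induction l with
  | nil => simp
  | cons x xs ih => simp [ih]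

theorem pvSet_getD_self {α : Type} (l : List α) (i : Nat) (d : α) (_h : i < l.length) :
    l.set i (l.getD i d) = l := by
  apply List.ext_getElem (by simp)
  intro n h1 h2
  rw [List.getElem_set]
  split
  · next heq => subst heq; rw [List.getD_eq_getElem l d h2]
  · rfl

theorem pvGetD_set_self {α : Type} (l : List α) (i : Nat) (v d : α) (h : i < l.length) :
    (l.set i v).getD i d = v := by
  simp [List.getD_eq_getElem?_getD, List.getElem?_set_self h]

theorem pvGetD_set_ne {α : Type} (l : List α) (i n : Nat) (v d : α) (h : i ≠ n) :
    (l.set i v).getD n d = l.getD n d := by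
  simp [List.getD_eq_getElem?_getD, List.getElem?_set_ne h]

-- A-proof-side rolling-row abstraction of A's table: the value of cell (i, j)
-- from the current row prefix `cur` and previous row `prev` …
def pvBVal (i j : Int) (v : Int) (prev cur : List Int) : Int :=
  if i = 0 ∧ j = 0 then 1
  else if v ≠ 0 then 0
  else (if 0 < j then PySem.List.pyGetD cur (j - 1) 0 else 0)
    + (if 0 < i ∧ j < (prev.length : Int) then PySem.List.pyGetD prev j 0 else 0)

-- … the whole row i …
def pvBRow (i : Int) (prev row : List Int) : List Int :=
  (PySem.List.enumerate row 0).foldl (fun cur jv => cur ++ [pvBVal i jv.1 jv.2 prev cur]) []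

-- … and the list of all rows
def pvRows : Nat → List Int → List (List Int) → List (List Int)
  | _, _, [] => []
  | i, prev, row :: rest => pvBRow (i : Int) prev row :: pvRows (i + 1) (pvBRow (i : Int) prev row) rest

-- A's inner loop turns row i of the table into the rolling row
theorem pv_inner (maze : List (List Int)) (i : Nat) (prev : List Int) :
    ∀ (rest pre cur tail : List Int) (p : List (List Int)),
      i < p.length →
      (0 < i → prev = p.getD (i - 1) []) →
      pre.length = cur.length →
      maze.getD i [] = pre ++ rest →
      p.getD i [] = cur ++ tail →
      tail.length = rest.length →
      (∀ k, k < tail.length → tail.getD k 0 = if i = 0 ∧ cur.length + k = 0 then (1 : Int) else 0) →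
      (PySem.List.enumerate rest (cur.length : Int)).foldl
          (fun q jc => pvStepA maze q (i : Int) jc.1) p
        = p.set i ((PySem.List.enumerate rest (cur.length : Int)).foldl
            (fun c jv => c ++ [pvBVal (i : Int) jv.1 jv.2 prev c]) cur) := by
  intro rest
  induction rest with
  | nil =>
    intro pre cur tail p hp hprev hpre hrow hcur htl htail
    have htail0 : tail = [] := List.length_eq_zero_iff.mp (by simpa using htl)
    subst htail0
    simp only [PySem.List.enumerate_nil, List.foldl_nil]
    rw [show cur = p.getD i [] by simpa using hcur.symm, pvSet_getD_self p i [] hp]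
  | cons v rest' ih =>
    intro pre cur tail p hp hprev hpre hrow hcur htl htail
    cases tail with
    | nil => simp at htl
    | cons t0 tail' =>
      have hv : pvGet2 maze (i : Int) (cur.length : Int) = v := by
        simp only [pvGet2, PySem.List.pyGetD_natCast]
        rw [hrow, ← hpre, pvGetD_append_len]
      have ht0 : t0 = if i = 0 ∧ cur.length = 0 then (1 : Int) else 0 := by
        have h := htail 0 (by simp)
        simpa using h
      have hset : ∀ X : Int, pvSet2 p (i : Int) (cur.length : Int) X = p.set i (cur ++ X :: tail') := by
        intro X
        simp only [pvSet2, PySem.List.pySetD_natCast, PySem.List.pyGetD_natCast]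
        rw [hcur, pvSet_append_len]
      have hstep : pvStepA maze p (i : Int) (cur.length : Int)
          = p.set i (cur ++ (pvBVal (i : Int) (cur.length : Int) v prev cur) :: tail') := by
        by_cases h00 : i = 0 ∧ cur.length = 0
        · obtain ⟨hi0, hn0⟩ := h00
          have hcur0 : cur = [] := List.length_eq_zero_iff.mp hn0
          have hval : pvBVal (i : Int) (cur.length : Int) v prev cur = 1 := by
            rw [pvBVal, if_pos (by simp [hi0, hn0])]
          rw [pvStepA, if_pos (by simp [hi0, hn0]), hval]
          have h1 : cur ++ (1 : Int) :: tail' = p.getD i [] := by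
            rw [hcur, ht0, if_pos ⟨hi0, hn0⟩]
          rw [h1, pvSet_getD_self p i [] hp]
        · have hnotor : ¬ ((i : Int) = 0 ∧ (cur.length : Int) = 0) := by
            intro h
            exact h00 ⟨by exact_mod_cast h.1, by exact_mod_cast h.2⟩
          rw [pvStepA, if_neg hnotor, hv]
          by_cases hvz : v = 0
          · rw [if_pos hvz]
            have hleft : cur.length ≠ 0 →
                pvGet2 p (i : Int) ((cur.length : Int) - 1) = cur.getD (cur.length - 1) 0 := by
              intro hn0
              have hc : ((cur.length : Int) - 1) = ((cur.length - 1 : Nat) : Int) := by omega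
              simp only [pvGet2, hc, PySem.List.pyGetD_natCast]
              rw [hcur, pvGetD_append_lt _ _ _ _ (by omega)]
            have hup : 0 < i →
                pvGet2 p ((i : Int) - 1) (cur.length : Int) = prev.getD cur.length 0 := by
              intro hipos
              have hc : ((i : Int) - 1) = ((i - 1 : Nat) : Int) := by omega
              simp only [pvGet2, hc, PySem.List.pyGetD_natCast]
              rw [← hprev hipos]
            have hupB : (if 0 < (i : Int) ∧ (cur.length : Int) < (prev.length : Int)
                then PySem.List.pyGetD prev (cur.length : Int) 0 else 0)
                = (if 0 < i then prev.getD cur.length 0 else 0) := by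
              by_cases hip : 0 < i
              · by_cases hlt : cur.length < prev.length
                · rw [if_pos ⟨by exact_mod_cast hip, by exact_mod_cast hlt⟩, if_pos hip]
                  simp
                · rw [if_neg (by omega), if_pos hip, pvGetD_ge _ _ _ (by omega)]
              · rw [if_neg (by omega), if_neg hip]
            by_cases hi0 : i = 0
            · have hn0 : cur.length ≠ 0 := fun h => h00 ⟨hi0, h⟩
              rw [if_pos (by simp [hi0]), hset]
              have hAB : pvGet2 p (i : Int) ((cur.length : Int) - 1)
                  = pvBVal (i : Int) (cur.length : Int) v prev cur := by
                rw [hleft hn0, pvBVal, if_neg hnotor, if_neg (by simp [hvz]),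
                  if_pos (by exact_mod_cast Nat.pos_of_ne_zero hn0),
                  if_neg (by simp [hi0])]
                have hc : ((cur.length : Int) - 1) = ((cur.length - 1 : Nat) : Int) := by omega
                rw [hc, PySem.List.pyGetD_natCast, add_zero]
              rw [hAB]
            · have hip : 0 < i := Nat.pos_of_ne_zero hi0
              rw [if_neg (by exact_mod_cast hi0)]
              by_cases hn0 : cur.length = 0
              · rw [if_pos (by exact_mod_cast hn0), hset]
                have hAB : pvGet2 p ((i : Int) - 1) (cur.length : Int)
                    = pvBVal (i : Int) (cur.length : Int) v prev cur := by
                  rw [hup hip, pvBVal, if_neg hnotor, if_neg (by simp [hvz]),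
                    if_neg (by exact_mod_cast hn0 ▸ (by omega : ¬ (0:Int) < (0:Nat))), hupB,
                    if_pos hip, zero_add]
                rw [hAB]
              · rw [if_neg (by exact_mod_cast hn0), hset]
                have hAB : pvGet2 p (i : Int) ((cur.length : Int) - 1)
                      + pvGet2 p ((i : Int) - 1) (cur.length : Int)
                    = pvBVal (i : Int) (cur.length : Int) v prev cur := by
                  rw [hleft hn0, hup hip, pvBVal, if_neg hnotor, if_neg (by simp [hvz]),
                    if_pos (by exact_mod_cast Nat.pos_of_ne_zero hn0), hupB, if_pos hip]
                  have hc : ((cur.length : Int) - 1) = ((cur.length - 1 : Nat) : Int) := by omega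
                  rw [hc, PySem.List.pyGetD_natCast]
                rw [hAB]
          · rw [if_neg hvz]
            have hval : pvBVal (i : Int) (cur.length : Int) v prev cur = 0 := by
              rw [pvBVal, if_neg hnotor, if_pos hvz]
            rw [hval]
            have h1 : cur ++ (0 : Int) :: tail' = p.getD i [] := by
              rw [hcur, ht0, if_neg (by omega)]
            rw [h1, pvSet_getD_self p i [] hp]
      rw [PySem.List.enumerate_cons]
      simp only [List.foldl_cons]
      rw [hstep]
      have hc1 : ((cur.length : Int) + 1) = (((cur ++ [pvBVal (i : Int) (cur.length : Int) v prev cur]).length : Nat) : Int) := by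
        simp
      rw [hc1]
      rw [ih (pre ++ [v]) (cur ++ [pvBVal (i : Int) (cur.length : Int) v prev cur]) tail'
        (p.set i (cur ++ (pvBVal (i : Int) (cur.length : Int) v prev cur) :: tail'))
        (by simpa using hp)
        (by intro hipos
            rw [pvGetD_set_ne _ _ _ _ _ (by omega)]
            exact hprev hipos)
        (by simp [hpre])
        (by rw [hrow]; simp)
        (by rw [pvGetD_set_self _ _ _ _ hp]; simp)
        (by simpa using htl)
        (by intro k hk
            have h := htail (k + 1) (by simpa using Nat.succ_lt_succ hk)
            simp only [List.getD_cons_succ] at h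
            rw [h, if_neg (by omega), if_neg (by simp only [List.length_append, List.length_cons]; omega)])]
      rw [List.set_set]

-- more getD helpers
theorem pvGetLastD_eq_getD {α : Type} (l : List α) (d : α) (_h : l ≠ []) :
    l.getLastD d = l.getD (l.length - 1) d := by
  rw [List.getLastD_eq_getLast?, List.getLast?_eq_getElem?]
  simp [List.getD_eq_getElem?_getD]

theorem pvGetLastD_concat {α : Type} (l : List α) (a d : α) : (l ++ [a]).getLastD d = a := by
  simp

theorem pvGetLastD_eq_getLast {α : Type} (l : List α) (d : α) (h : l ≠ []) :
    l.getLastD d = l.getLast h := by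
  simp [List.getLastD_eq_getLast?, List.getLast?_eq_some_getLast h]

theorem pvGetD_replicate (n m : Nat) (d : Int) : (List.replicate n (0 : Int)).getD m d = if m < n then 0 else d := by
  simp [List.getD_eq_getElem?_getD, List.getElem?_replicate]; split <;> simp

-- A's outer loop produces exactly the rows pvRows computes
theorem pv_outer (maze : List (List Int)) :
    ∀ (rest : List (List Int)) (n : Nat) (mpre done suffix : List (List Int)) (prev : List Int),
      mpre.length = n →
      maze = mpre ++ rest →
      List.length done = n →
      (0 < n → prev = done.getLastD []) →
      suffix.length = rest.length →
      (∀ k, k < rest.length →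
        (suffix.getD k []).length = (rest.getD k []).length ∧
        ∀ m, m < (suffix.getD k []).length →
          (suffix.getD k []).getD m 0 = if n + k = 0 ∧ m = 0 then (1 : Int) else 0) →
      (PySem.List.enumerate rest (n : Int)).foldl
        (fun p ir => (PySem.List.enumerate (PySem.List.pyGetD maze ir.1 []) 0).foldl
          (fun q jc => pvStepA maze q ir.1 jc.1) p) (done ++ suffix)
        = done ++ pvRows n prev rest := by
  intro rest
  induction rest with
  | nil =>
    intro n mpre done suffix prev hm hmaze hd hprev hsl hsuf
    have : suffix = [] := List.length_eq_zero_iff.mp (by simpa using hsl)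
    subst this
    simp [PySem.List.enumerate_nil, pvRows]
  | cons row rest2 ih =>
    intro n mpre done suffix prev hm hmaze hd hprev hsl hsuf
    cases suffix with
    | nil => simp at hsl
    | cons s0 suf' =>
      have hrowi : maze.getD n [] = row := by
        rw [hmaze, ← hm, pvGetD_append_len]
      have hplen : n < (done ++ s0 :: suf').length := by simp [hd]
      rw [PySem.List.enumerate_cons]
      simp only [List.foldl_cons]
      have hmz : PySem.List.pyGetD maze (n : Int) [] = row := by
        rw [PySem.List.pyGetD_natCast, hrowi]
      have key := pv_inner maze n prev row [] [] s0 (done ++ s0 :: suf')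
        hplen
        (by intro hnpos
            rw [pvGetD_append_lt _ _ _ _ (by omega), hprev hnpos,
              pvGetLastD_eq_getD done [] (by intro h; rw [h] at hd; simp at hd; omega), hd])
        rfl
        (by simpa using hrowi)
        (by rw [← hd, pvGetD_append_len]; simp)
        (by simpa using (hsuf 0 (by simp)).1)
        (by intro k hk
            have h := (hsuf 0 (by simp)).2 k (by simpa using hk)
            simp only [List.getD_cons_zero, List.length_nil, Nat.zero_add] at h ⊢
            rw [h]
            by_cases hc : n = 0 ∧ k = 0
            · rw [if_pos (by omega), if_pos (by omega)]
            · rw [if_neg (by omega), if_neg (by omega)])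
      simp only [List.length_nil, Nat.cast_zero] at key
      rw [hmz, key]
      have hsetrow : (done ++ s0 :: suf').set n (pvBRow (n : Int) prev row)
          = (done ++ [pvBRow (n : Int) prev row]) ++ suf' := by
        rw [← hd, pvSet_append_len]
        simp
      rw [show ((PySem.List.enumerate row 0).foldl
            (fun c jv => c ++ [pvBVal (n : Int) jv.1 jv.2 prev c]) [])
          = pvBRow (n : Int) prev row from rfl, hsetrow]
      have hc1 : ((n : Int) + 1) = ((n + 1 : Nat) : Int) := by omega
      rw [hc1]
      rw [ih (n + 1) (mpre ++ [row]) (done ++ [pvBRow (n : Int) prev row]) suf'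
        (pvBRow (n : Int) prev row)
        (by simp [hm])
        (by rw [hmaze]; simp)
        (by simp [hd])
        (by intro _; rw [pvGetLastD_concat])
        (by simpa using hsl)
        (by intro k hk
            have h := hsuf (k + 1) (by simpa using Nat.succ_lt_succ hk)
            simp only [List.getD_cons_succ] at h
            refine ⟨h.1, fun m hm2 => ?_⟩
            rw [h.2 m hm2, if_neg (by omega), if_neg (by omega)])]
      simp [pvRows]

-- ===== rolling rows compute pvSpec =====

-- row invariant: row r is row i of the path-count table
def pvRowOK (maze : List (List Int)) (i : Nat) (r : List Int) : Prop :=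
  r.length = (maze.getD i []).length ∧
  ∀ j, j < r.length → r.getD j 0 = pvSpec maze (i : Int) (j : Int)

theorem pvSpec_neg {maze : List (List Int)} {i j : Int} (h : i < 0 ∨ j < 0) :
    pvSpec maze i j = 0 := by
  rw [pvSpec, if_neg (by omega), if_pos h]

-- one cell: pvBVal computes pvSpec
theorem pvBVal_spec (maze : List (List Int)) (hPre : Pre_maze_paths maze)
    (n : Nat) (hn : n < maze.length) (prev : List Int)
    (hprev : 0 < n → pvRowOK maze (n - 1) prev)
    (j : Nat) (hj : j < (maze.getD n []).length)
    (cur : List Int) (hcl : cur.length = j)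
    (hcur : ∀ k, k < cur.length → cur.getD k 0 = pvSpec maze (n : Int) (k : Int)) :
    pvBVal (n : Int) (j : Int) ((maze.getD n []).getD j 0) prev cur
      = pvSpec maze (n : Int) (j : Int) := by
  set v := (maze.getD n []).getD j 0 with hv
  by_cases h00 : n = 0 ∧ j = 0
  · rw [pvBVal, if_pos (by exact_mod_cast h00), pvSpec, if_pos (by exact_mod_cast h00)]
  · have hnotor : ¬ ((n : Int) = 0 ∧ (j : Int) = 0) := by
      intro h; exact h00 ⟨by exact_mod_cast h.1, by exact_mod_cast h.2⟩
    have hget : PySem.List.pyGetD (PySem.List.pyGetD maze (n : Int) []) (j : Int) 0 = v := by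
      simp only [PySem.List.pyGetD_natCast, hv]
    have hS : pvSpec maze (n : Int) (j : Int)
        = if v ≠ 0 then 0 else pvSpec maze (n : Int) ((j : Int) - 1) + pvSpec maze ((n : Int) - 1) (j : Int) := by
      rw [pvSpec, if_neg hnotor, if_neg (show ¬((n : Int) < 0 ∨ (j : Int) < 0) by omega), hget]
    have hB : pvBVal (n : Int) (j : Int) v prev cur
        = if v ≠ 0 then 0 else
            (if 0 < (j : Int) then PySem.List.pyGetD cur ((j : Int) - 1) 0 else 0)
              + (if 0 < (n : Int) ∧ (j : Int) < (prev.length : Int) then PySem.List.pyGetD prev (j : Int) 0 else 0) := by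
      rw [pvBVal, if_neg hnotor]
    rw [hB, hS]
    by_cases hvz : v ≠ 0
    · rw [if_pos hvz, if_pos hvz]
    · rw [if_neg hvz, if_neg hvz]
      push_neg at hvz
      have hleft : (if 0 < (j : Int) then PySem.List.pyGetD cur ((j : Int) - 1) 0 else 0)
          = pvSpec maze (n : Int) ((j : Int) - 1) := by
        by_cases hjp : 0 < j
        · rw [if_pos (by exact_mod_cast hjp)]
          have hc : ((j : Int) - 1) = ((j - 1 : Nat) : Int) := by omega
          rw [hc, PySem.List.pyGetD_natCast, hcur (j - 1) (by omega)]
        · have hj0 : j = 0 := by omega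
          rw [if_neg (by omega), hj0, pvSpec_neg (by right; omega)]
      have hup : (if 0 < (n : Int) ∧ (j : Int) < (prev.length : Int)
          then PySem.List.pyGetD prev (j : Int) 0 else 0)
          = pvSpec maze ((n : Int) - 1) (j : Int) := by
        by_cases hnp : 0 < n
        · have hpOK := hprev hnp
          have hjlt : j < prev.length := by
            rw [hpOK.1]
            exact hPre.2.2.2 n hn j hj hnp (by rw [← hv]; exact hvz)
          rw [if_pos ⟨by exact_mod_cast hnp, by exact_mod_cast hjlt⟩,
            PySem.List.pyGetD_natCast, hpOK.2 j hjlt]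
          have hc : ((n : Int) - 1) = ((n - 1 : Nat) : Int) := by omega
          rw [hc]
        · have hn0 : n = 0 := by omega
          rw [if_neg (by omega), hn0, pvSpec_neg (by left; omega)]
      rw [hleft, hup]

-- one row: pvBRow's fold satisfies the invariant
theorem pvBRow_inner (maze : List (List Int)) (hPre : Pre_maze_paths maze)
    (n : Nat) (hn : n < maze.length) (prev : List Int)
    (hprev : 0 < n → pvRowOK maze (n - 1) prev) :
    ∀ (suffix pre cur : List Int),
      maze.getD n [] = pre ++ suffix →
      cur.length = pre.length →
      (∀ k, k < cur.length → cur.getD k 0 = pvSpec maze (n : Int) (k : Int)) →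
      ((PySem.List.enumerate suffix (cur.length : Int)).foldl
          (fun c jv => c ++ [pvBVal (n : Int) jv.1 jv.2 prev c]) cur).length
        = (maze.getD n []).length ∧
      ∀ j, j < ((PySem.List.enumerate suffix (cur.length : Int)).foldl
          (fun c jv => c ++ [pvBVal (n : Int) jv.1 jv.2 prev c]) cur).length →
        ((PySem.List.enumerate suffix (cur.length : Int)).foldl
          (fun c jv => c ++ [pvBVal (n : Int) jv.1 jv.2 prev c]) cur).getD j 0
          = pvSpec maze (n : Int) (j : Int) := by
  intro suffix
  induction suffix with
  | nil =>
    intro pre cur hrow hcl hcur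
    simp only [PySem.List.enumerate_nil, List.foldl_nil]
    exact ⟨by rw [hrow]; simpa using hcl, hcur⟩
  | cons v suffix' ih =>
    intro pre cur hrow hcl hcur
    rw [PySem.List.enumerate_cons]
    simp only [List.foldl_cons]
    have hjlt : cur.length < (maze.getD n []).length := by
      rw [hrow, hcl]; simp
    have hvv : v = (maze.getD n []).getD cur.length 0 := by
      rw [hrow, hcl, pvGetD_append_len]
    have hcell : pvBVal (n : Int) ((cur.length : Nat) : Int) v prev cur
        = pvSpec maze (n : Int) ((cur.length : Nat) : Int) := by
      rw [hvv]
      exact pvBVal_spec maze hPre n hn prev hprev cur.length hjlt cur rfl hcur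
    have hc1 : ((cur.length : Int) + 1)
        = (((cur ++ [pvBVal (n : Int) (cur.length : Int) v prev cur]).length : Nat) : Int) := by
      simp
    rw [hc1]
    exact ih (pre ++ [v]) (cur ++ [pvBVal (n : Int) (cur.length : Int) v prev cur])
      (by rw [hrow]; simp)
      (by simp [hcl])
      (by intro k hk
          simp only [List.length_append, List.length_cons, List.length_nil] at hk
          by_cases hke : k < cur.length
          · rw [pvGetD_append_lt _ _ _ _ hke]; exact hcur k hke
          · have hkc : k = cur.length := by omega
            rw [hkc, pvGetD_append_len, hcell])

theorem pvBRow_ok (maze : List (List Int)) (hPre : Pre_maze_paths maze)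
    (n : Nat) (hn : n < maze.length) (prev : List Int)
    (hprev : 0 < n → pvRowOK maze (n - 1) prev) :
    pvRowOK maze n (pvBRow (n : Int) prev (maze.getD n [])) := by
  have h := pvBRow_inner maze hPre n hn prev hprev (maze.getD n []) [] [] (by simp) rfl
    (by intro k hk; simp at hk)
  simp only [List.length_nil, Nat.cast_zero] at h
  exact h

-- drop-based access helpers
theorem pvDrop_getD {α : Type} (l : List α) (n : Nat) (x : α) (rest : List α) (d : α)
    (h : l.drop n = x :: rest) : l.getD n d = x := by
  have h0 : (l.drop n)[0]? = some x := by rw [h]; rfl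
  rw [List.getElem?_drop] at h0
  simp only [Nat.add_zero] at h0
  simp [List.getD_eq_getElem?_getD, h0]

theorem pvDrop_succ {α : Type} (l : List α) (n : Nat) (x : α) (rest : List α)
    (h : l.drop n = x :: rest) : l.drop (n + 1) = rest := by
  have : l.drop (n + 1) = (l.drop n).drop 1 := by
    rw [List.drop_drop]
  rw [this, h]
  rfl

-- the last of the rolling rows is the last table row
theorem pvRows_last_ok (maze : List (List Int)) (hPre : Pre_maze_paths maze) :
    ∀ (rest : List (List Int)) (n : Nat) (prev : List Int),
      maze.drop n = rest →
      (0 < n → pvRowOK maze (n - 1) prev) →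
      rest ≠ [] →
      pvRowOK maze (n + rest.length - 1) ((pvRows n prev rest).getLastD prev) := by
  intro rest
  induction rest with
  | nil => intro n prev _ _ hne; exact absurd rfl hne
  | cons row rest2 ih =>
    intro n prev hdrop hprev _
    have hn : n < maze.length := by
      have : maze.length - n = (row :: rest2).length := by
        rw [← hdrop, List.length_drop]
      simp at this
      omega
    have hrow : maze.getD n [] = row := pvDrop_getD maze n row rest2 [] hdrop
    have hrok : pvRowOK maze n (pvBRow (n : Int) prev row) := by
      rw [← hrow]
      exact pvBRow_ok maze hPre n hn prev hprev
    cases rest2 with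
    | nil =>
      simp only [pvRows, List.getLastD_cons, List.getLastD_nil]
      simpa using hrok
    | cons r2 rest3 =>
      have hkey := ih (n + 1) (pvBRow (n : Int) prev row)
        (pvDrop_succ maze n row (r2 :: rest3) hdrop)
        (by intro _; simpa using hrok)
        (by simp)
      rw [show pvRows n prev (row :: r2 :: rest3)
          = pvBRow (n : Int) prev row :: pvRows (n + 1) (pvBRow (n : Int) prev row) (r2 :: rest3)
          from rfl, List.getLastD_cons]
      have hlen : n + 1 + (r2 :: rest3).length - 1 = n + (row :: r2 :: rest3).length - 1 := by
        simp; omega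
      rw [← hlen]
      exact hkey

-- ===== pvCount computes pvSpec =====

def pvMemoOK (maze : List (List Int)) (d : PySem.Dict (Int × Int) Int) : Prop :=
  ∀ i j v, d.get? (i, j) = some v → v = pvSpec maze i j

theorem pvCount_ok (maze : List (List Int)) :
    ∀ (N : Nat) (i j : Int), (i + j).toNat ≤ N → ∀ memo, pvMemoOK maze memo →
      (pvCount maze memo i j).2 = pvSpec maze i j
        ∧ pvMemoOK maze (pvCount maze memo i j).1 := by
  intro N
  induction N with
  | zero =>
    intro i j hN memo hm
    rw [pvCount]
    by_cases h00 : i = 0 ∧ j = 0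
    · rw [if_pos h00]
      exact ⟨by rw [pvSpec, if_pos h00], hm⟩
    · rw [if_neg h00]
      have hneg : i < 0 ∨ j < 0 := by omega
      rw [if_pos hneg]
      exact ⟨(pvSpec_neg hneg).symm, hm⟩
  | succ N ih =>
    intro i j hN memo hm
    rw [pvCount]
    by_cases h00 : i = 0 ∧ j = 0
    · rw [if_pos h00]
      exact ⟨by rw [pvSpec, if_pos h00], hm⟩
    · rw [if_neg h00]
      by_cases hneg : i < 0 ∨ j < 0
      · rw [if_pos hneg]
        exact ⟨(pvSpec_neg hneg).symm, hm⟩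
      · rw [if_neg hneg]
        cases hget : memo.get? (i, j) with
        | some v =>
          exact ⟨hm i j v hget, hm⟩
        | none =>
          by_cases hobs : PySem.List.pyGetD (PySem.List.pyGetD maze i []) j 0 ≠ 0
          · rw [if_pos hobs]
            have hspec : pvSpec maze i j = 0 := by
              rw [pvSpec, if_neg h00, if_neg hneg, if_pos hobs]
            refine ⟨hspec.symm, ?_⟩
            intro a b w hw
            rw [PySem.Dict.get?_insert] at hw
            by_cases heq : ((a, b) : Int × Int) = (i, j)
            · rw [if_pos heq] at hw
              have ha : a = i := congrArg Prod.fst heq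
              have hb : b = j := congrArg Prod.snd heq
              rw [ha, hb, hspec]
              exact (Option.some.injEq _ _ ▸ hw).symm
            · rw [if_neg heq] at hw
              exact hm a b w hw
          · rw [if_neg hobs]
            have h1 := ih i (j - 1) (by omega) memo hm
            have h2 := ih (i - 1) j (by omega) (pvCount maze memo i (j - 1)).1 h1.2
            have hspec : pvSpec maze i j = pvSpec maze i (j - 1) + pvSpec maze (i - 1) j := by
              rw [pvSpec, if_neg h00, if_neg hneg, if_neg hobs]
            simp only []
            constructor
            · rw [hspec, h1.1, h2.1]
            · intro a b w hw
              rw [PySem.Dict.get?_insert] at hw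
              by_cases heq : ((a, b) : Int × Int) = (i, j)
              · rw [if_pos heq] at hw
                have ha : a = i := congrArg Prod.fst heq
                have hb : b = j := congrArg Prod.snd heq
                rw [ha, hb, hspec, ← h1.1, ← h2.1]
                exact (Option.some.injEq _ _ ▸ hw).symm
              · rw [if_neg heq] at hw
                exact h2.2 a b w hw

-- ===== main theorem =====

theorem pv_main (maze : List (List Int)) (hPre : Pre_maze_paths maze) :
    maze_paths maze = maze_paths_alt maze := by
  obtain ⟨hne, hfirst, hlast, hrag⟩ := hPre
  cases hmz : maze with
  | nil => exact absurd hmz hne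
  | cons m0 mrest =>
  subst hmz
  -- names
  have hlenpos : 0 < (m0 :: mrest).length := by simp
  -- A-side: the table rows
  have hinit : pvSet2 ((m0 :: mrest).map (fun row => List.replicate row.length (0 : Int))) 0 0 1
      = ((List.replicate m0.length (0 : Int)).set 0 1)
        :: mrest.map (fun row => List.replicate row.length (0 : Int)) := by
    rw [pvSet2, PySem.List.pySetD_of_nonneg _ _ (show (0:Int) ≤ 0 by norm_num),
      PySem.List.pySetD_of_nonneg _ _ (show (0:Int) ≤ 0 by norm_num)]
    simp [PySem.List.pyGetD_zero]
  have hrowsne : pvRows 0 [] (m0 :: mrest) ≠ [] := by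
    rw [show pvRows 0 [] (m0 :: mrest)
        = pvBRow (0 : Int) [] m0 :: pvRows 1 (pvBRow (0 : Int) [] m0) mrest from rfl]
    exact List.cons_ne_nil _ _
  have hA := pv_outer (m0 :: mrest) (m0 :: mrest) 0 [] []
    (((List.replicate m0.length (0 : Int)).set 0 1)
      :: mrest.map (fun row => List.replicate row.length (0 : Int))) []
    rfl (by simp) rfl (fun h => absurd h (by omega)) (by simp)
    (by intro k hk
        cases k with
        | zero =>
          constructor
          · simp
          · intro m hm
            simp only [List.getD_cons_zero, List.length_set, List.length_replicate] at hm ⊢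
            by_cases hm0 : m = 0
            · subst hm0
              rw [pvGetD_set_self _ _ _ _ (by simp only [List.length_replicate]; exact hm), if_pos (by simp)]
            · rw [pvGetD_set_ne _ _ _ _ _ (fun h => hm0 h.symm), pvGetD_replicate,
                if_pos hm, if_neg (by omega)]
        | succ k =>
          have hk2 : k < mrest.length := by simpa using hk
          have hmap : (mrest.map (fun row => List.replicate row.length (0 : Int))).getD k []
              = List.replicate (mrest[k]'hk2).length (0 : Int) := by
            simp [List.getD_eq_getElem?_getD, List.getElem?_eq_getElem hk2]
          have hmg : mrest.getD k [] = mrest[k]'hk2 := List.getD_eq_getElem mrest [] hk2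
          constructor
          · simp only [List.getD_cons_succ, hmap, hmg, List.length_replicate]
          · intro m hm
            simp only [List.getD_cons_succ, hmap] at hm ⊢
            rw [pvGetD_replicate, if_pos (by simpa using hm), if_neg (by omega)])
  simp only [Nat.cast_zero, List.nil_append] at hA
  -- the last rolling row satisfies the invariant
  have hPre' : Pre_maze_paths (m0 :: mrest) := ⟨hne, hfirst, hlast, hrag⟩
  have hlastrow := pvRows_last_ok (m0 :: mrest) hPre' (m0 :: mrest) 0 [] (by simp)
    (fun h => absurd h (by omega)) (by simp)
  simp only [Nat.zero_add] at hlastrow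
  -- last row of the maze
  have hmlast : (m0 :: mrest).getD ((m0 :: mrest).length - 1) []
      = (m0 :: mrest).getLastD [] := (pvGetLastD_eq_getD _ [] (by simp)).symm
  have hlastlen : 0 < ((m0 :: mrest).getD ((m0 :: mrest).length - 1) []).length := by
    rw [hmlast]
    exact List.length_pos_iff.mpr hlast
  have hlrne : (pvRows 0 [] (m0 :: mrest)).getLastD [] ≠ [] := by
    intro h
    have h1 := hlastrow.1
    rw [h] at h1
    simp only [List.length_nil] at h1
    omega
  -- A's return value
  have hAval : maze_paths (m0 :: mrest)
      = pvSpec (m0 :: mrest) (((m0 :: mrest).length - 1 : Nat) : Int)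
          ((((m0 :: mrest).getD ((m0 :: mrest).length - 1) []).length - 1 : Nat) : Int) := by
    simp only [maze_paths, hinit, hA]
    rw [PySem.List.pyGetD_neg_one _ _ hrowsne,
      ← pvGetLastD_eq_getLast _ [] hrowsne,
      PySem.List.pyGetD_neg_one _ _ hlrne,
      ← pvGetLastD_eq_getLast _ (0 : Int) hlrne,
      pvGetLastD_eq_getD _ _ hlrne,
      hlastrow.2 _ (by rw [hlastrow.1]; omega)]
    rw [hlastrow.1]
  -- B's return value
  have hmemo0 : pvMemoOK (m0 :: mrest) PySem.Dict.empty := by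
    intro a b w hw
    rw [PySem.Dict.get?_empty] at hw
    exact absurd hw (by simp)
  have hBval : maze_paths_alt (m0 :: mrest)
      = pvSpec (m0 :: mrest) (((m0 :: mrest).length : Int) - 1)
          (((PySem.List.pyGetD (m0 :: mrest) (-1) []).length : Int) - 1) := by
    exact (pvCount_ok (m0 :: mrest) _ _ _ le_rfl PySem.Dict.empty hmemo0).1
  rw [hAval, hBval]
  have hc1 : ((m0 :: mrest).length : Int) - 1 = (((m0 :: mrest).length - 1 : Nat) : Int) := by
    have : 0 < (m0 :: mrest).length := by simp
    omega
  have hc2 : PySem.List.pyGetD (m0 :: mrest) (-1) []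
      = (m0 :: mrest).getD ((m0 :: mrest).length - 1) [] := by
    rw [PySem.List.pyGetD_neg_one _ _ (by simp), ← pvGetLastD_eq_getLast _ [] (by simp), hmlast]
  have hc3 : ((PySem.List.pyGetD (m0 :: mrest) (-1) []).length : Int) - 1
      = ((((m0 :: mrest).getD ((m0 :: mrest).length - 1) []).length - 1 : Nat) : Int) := by
    rw [hc2]; omega
  rw [hc1, hc3]

-- ===== VERDICT (by name: the statement is the Claim_ definition above) =====
theorem maze_paths_spec : Claim_equal_maze_paths := by
  intro maze _ hPre
  unfold Spec_maze_paths
  exact pv_main maze hPre
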